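-- pv_equiv track=rewrite | github.com/Jooh34/algorithm | programmers/152995.py | solution
-- ===== SOURCE A (Python) =====
-- def solution(scores):
--     wanho, scores = scores[0], scores[1:]
--     wanho_a, wanho_b = wanho
--     rank = 1
--     last_b = 0
--     for a,b in sorted(scores, key=lambda x: (-x[0], x[1])):
--         if wanho_a < a and wanho_b < b:
--             return -1
--
--         if last_b <= b:
--             last_b = b
--
--             if wanho_a + wanho_b < a + b:
--                 rank += 1
--
--     return rank
-- ===== SOURCE B (Python) =====
-- def solution(scores):
--     wanho, others = scores[0], scores[1:]
--     wa, wb = wanho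
--     if any(a > wa and b > wb for a, b in others):
--         return -1
--     return 1 + sum(1 for a, b in others
--                    if wa + wb < a + b
--                    and not any(a2 > a and b2 > b for a2, b2 in others))
-- ===== Notes on version B (the rewrite author's own statement) =====
-- stated objective: alternative
-- what changed: Replaces A's sort by (-a, b) plus a running-max sweep with two direct scans: a domination check and a count of undominated higher-total competitors (O(n log n) sweep becomes O(n^2) repeated scan, no sort and no mutable sweep state).
-- intended difference: On inputs where no competitor dominates wanho but some undominated competitor with a negative second score has a strictly larger total, A's last_b = 0 initialisation silently skips that competitor and returns a too-small rank (e.g. 1 for [[5,5],[20,-1]]), while B counts it and returns 2; B's value is the intended rank, since any undominated competitor with a larger total outranks wanho. — e.g. on solution([[5, 5], [20, -1]]): A returns 1, B returns 2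
import Mathlib
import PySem

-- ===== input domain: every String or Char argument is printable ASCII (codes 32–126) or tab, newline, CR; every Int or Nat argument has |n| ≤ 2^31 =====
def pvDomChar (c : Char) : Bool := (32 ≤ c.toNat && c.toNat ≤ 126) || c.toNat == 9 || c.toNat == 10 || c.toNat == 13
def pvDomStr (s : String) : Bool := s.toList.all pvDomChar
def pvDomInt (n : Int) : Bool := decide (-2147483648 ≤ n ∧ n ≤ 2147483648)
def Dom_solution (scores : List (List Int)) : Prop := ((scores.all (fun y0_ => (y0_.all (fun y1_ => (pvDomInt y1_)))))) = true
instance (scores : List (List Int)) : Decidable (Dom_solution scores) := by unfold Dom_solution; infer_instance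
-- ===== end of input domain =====

-- B drops A's sort-and-sweep and counts undominated higher-total competitors by a direct scan;
-- on inputs with an undominated higher-total competitor whose second score is negative, A's
-- last_b = 0 initialisation undercounts (see D_solution), elsewhere the two agree
-- (objective: alternative).

-- ===== PORT A =====
-- x[0] and x[1] of a length-2 score pair (Pre_ guarantees length 2, so getD is exact)
def fa (x : List Int) : Int := x.getD 0 0
def fb (x : List Int) : Int := x.getD 1 0

-- the for-loop of A over the sorted list, carrying (rank, last_b); early `return -1` is the -1 branch
def loopA (wa wb : Int) : List (List Int) → Int → Int → Int
  | [], rank, _lastb => rank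
  | x :: t, rank, lastb =>
    if wa < fa x ∧ wb < fb x then -1
    else if lastb ≤ fb x then
      loopA wa wb t (if wa + wb < fa x + fb x then rank + 1 else rank) (fb x)
    else
      loopA wa wb t rank lastb

def solution (scores : List (List Int)) : Int :=
  match scores with
  | [] => 0  -- unreachable: Python raises IndexError on scores[0]; Pre_ excludes []
  | w :: rest =>
      loopA (fa w) (fb w)
        (PySem.List.sorted2 rest (fun x => -(fa x)) (fun x => fb x)) 1 0

-- ===== PORT B =====
-- `a2 > a and b2 > b` : y strictly dominates x
def domBy (x y : List Int) : Bool := decide (fa x < fa y) && decide (fb x < fb y)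

def solution_alt (scores : List (List Int)) : Int :=
  match scores with
  | [] => 0  -- unreachable: Python raises IndexError on scores[0]; Pre_ excludes []
  | w :: others =>
      if others.any (fun y => domBy w y) then -1
      else 1 + (others.countP (fun x =>
        decide (fa w + fb w < fa x + fb x) && !(others.any (fun y => domBy x y))) : Int)

-- ===== PRECONDITION & SPEC =====
-- Python A raises on an empty scores list (IndexError at scores[0], and B's Python raises
-- there too) and on any row whose length is not 2 (ValueError/IndexError at unpacking /
-- the sort key); exactly those inputs are excluded.
def Pre_solution (scores : List (List Int)) : Prop :=
  scores ≠ [] ∧ ∀ x ∈ scores, x.length = 2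

instance (scores : List (List Int)) : Decidable (Pre_solution scores) := by
  unfold Pre_solution; infer_instance

def pvWitness_solution : List (List Int) := [[1, 2], [3, 4]]

-- On inputs where no competitor dominates wanho but some undominated competitor with a
-- NEGATIVE second score has a strictly larger total, A's `last_b = 0` initialisation skips
-- that competitor and returns a too-small rank, while B counts it; B's value is the intended
-- rank, since any undominated competitor with a larger total outranks wanho.
def worse (x y : List Int) : Bool :=
  decide (x.getD 0 0 < y.getD 0 0 ∧ x.getD 1 0 < y.getD 1 0)

def D_solution (scores : List (List Int)) : Prop :=
  (∀ y ∈ scores, ¬ worse scores.headI y) ∧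
  ∃ x ∈ scores.tail, x.getD 1 0 < 0 ∧ scores.headI.sum < x.sum ∧ ∀ y ∈ scores, ¬ worse x y

instance (scores : List (List Int)) : Decidable (D_solution scores) := by
  unfold D_solution; infer_instance

def Spec_solution (scores : List (List Int)) (out : Int) : Prop :=
  ¬ D_solution scores → out = solution_alt scores

instance (scores : List (List Int)) (out : Int) : Decidable (Spec_solution scores out) := by
  unfold Spec_solution; infer_instance

def pvDiffWitness_solution : List (List Int) := [[5, 5], [20, -1]]

def pvDiffWitnessOut_solution : Int × Int := (1, 2)

-- ===== CLAIM (what is proved, stated in full; the proofs are below) =====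
def Claim_unchanged_solution : Prop := ∀ (scores : List (List Int)), Dom_solution scores → Pre_solution scores → Spec_solution scores (solution scores)
def Claim_changed_solution : Prop := Dom_solution (pvDiffWitness_solution) ∧ Pre_solution (pvDiffWitness_solution) ∧ D_solution (pvDiffWitness_solution) ∧ solution (pvDiffWitness_solution) = pvDiffWitnessOut_solution.1 ∧ solution_alt (pvDiffWitness_solution) = pvDiffWitnessOut_solution.2 ∧ pvDiffWitnessOut_solution.1 ≠ pvDiffWitnessOut_solution.2
def Claim_exact_solution : Prop := ∀ (scores : List (List Int)), Dom_solution scores → Pre_solution scores → D_solution scores → solution scores ≠ solution_alt scores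

-- ===== LEMMAS AND PROOFS =====

-- the strict "before" relation of A's sort key (-x[0], x[1]) (definitionally sorted2's)
def ltK (x y : List Int) : Bool :=
  decide (-(fa x) < -(fa y)) || (!decide (-(fa y) < -(fa x)) && decide (fb x < fb y))

lemma sorted2_eq_foldl (rest : List (List Int)) :
    PySem.List.sorted2 rest (fun x => -(fa x)) (fun x => fb x) =
      rest.foldl (fun acc x => PySem.List.insertBy ltK x acc) [] := rfl

lemma ltK_iff (x y : List Int) :
    ltK x y = true ↔ (fa y < fa x ∨ (fa x = fa y ∧ fb x < fb y)) := by
  simp only [ltK, Bool.or_eq_true, Bool.and_eq_true, Bool.not_eq_true',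
    decide_eq_true_eq, decide_eq_false_iff_not]
  omega

lemma ltK_false_iff (x y : List Int) :
    ltK x y = false ↔ (fa x < fa y ∨ (fa x = fa y ∧ fb y ≤ fb x)) := by
  rw [← Bool.not_eq_true, ltK_iff]
  omega

lemma ltK_asymm {x y : List Int} (h : ltK x y = true) : ltK y x = false := by
  rw [ltK_iff] at h
  rw [ltK_false_iff]
  omega

lemma ltK_negtrans {x y z : List Int} (h1 : ltK z y = false) (h2 : ltK x y = true) :
    ltK z x = false := by
  rw [ltK_false_iff] at h1 ⊢
  rw [ltK_iff] at h2
  omega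

lemma insertBy_pairwise (x : List Int) (ys : List (List Int))
    (h : ys.Pairwise (fun p q => ltK q p = false)) :
    (PySem.List.insertBy ltK x ys).Pairwise (fun p q => ltK q p = false) := by
  induction ys with
  | nil => simp [PySem.List.insertBy]
  | cons y ys ih =>
    rcases List.pairwise_cons.mp h with ⟨hy, hys⟩
    by_cases hlt : ltK x y = true
    · simp only [PySem.List.insertBy, hlt, if_true]
      refine List.Pairwise.cons ?_ (List.Pairwise.cons hy hys)
      intro z hz
      rcases List.mem_cons.mp hz with rfl | hz
      · exact ltK_asymm hlt
      · exact ltK_negtrans (hy z hz) hlt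
    · simp only [PySem.List.insertBy, hlt, if_false]
      refine List.Pairwise.cons ?_ (ih hys)
      intro z hz
      rcases (PySem.List.mem_insertBy ltK x z ys).mp hz with rfl | hz
      · exact Bool.eq_false_iff.mpr hlt
      · exact hy z hz

lemma foldl_insertBy_pairwise (xs acc : List (List Int))
    (h : acc.Pairwise (fun p q => ltK q p = false)) :
    (xs.foldl (fun acc x => PySem.List.insertBy ltK x acc) acc).Pairwise
      (fun p q => ltK q p = false) := by
  induction xs generalizing acc with
  | nil => exact h
  | cons x xs ih => exact ih _ (insertBy_pairwise x acc h)

-- A returns -1 as soon as (hence iff) some competitor dominates wanho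
lemma loopA_dominated (wa wb : Int) (l : List (List Int)) (rank lastb : Int)
    (h : ∃ x ∈ l, wa < fa x ∧ wb < fb x) :
    loopA wa wb l rank lastb = -1 := by
  induction l generalizing rank lastb with
  | nil => simp at h
  | cons x t ih =>
    rcases h with ⟨z, hz, hdom⟩
    rcases List.mem_cons.mp hz with rfl | hz
    · simp [loopA, hdom]
    · by_cases hx : wa < fa x ∧ wb < fb x
      · simp [loopA, hx]
      · simp only [loopA, hx, if_false]
        split
        · exact ih _ _ ⟨z, hz, hdom⟩
        · exact ih _ _ ⟨z, hz, hdom⟩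

-- the sweep count of A's loop, in isolation
def cg (wa wb : Int) : List (List Int) → Int → Int
  | [], _ => 0
  | x :: t, lb =>
    if lb ≤ fb x then
      (if wa + wb < fa x + fb x then (1 : Int) else 0) + cg wa wb t (fb x)
    else cg wa wb t lb

lemma loopA_eq_cg (wa wb : Int) (l : List (List Int)) (rank lastb : Int)
    (hnd : ∀ x ∈ l, ¬(wa < fa x ∧ wb < fb x)) :
    loopA wa wb l rank lastb = rank + cg wa wb l lastb := by
  induction l generalizing rank lastb with
  | nil => simp [loopA, cg]
  | cons x t ih =>
    have hx := hnd x (List.mem_cons_self ..)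
    have hnd' : ∀ y ∈ t, ¬(wa < fa y ∧ wb < fb y) := fun y hy => hnd y (List.mem_cons_of_mem _ hy)
    simp only [loopA, cg, hx, if_false]
    split
    · rw [ih _ _ hnd']
      split <;> ring
    · exact ih _ _ hnd'

-- the sweep over a key-sorted list counts exactly the undominated higher-total competitors
-- whose second score is at least the initial last_b
lemma cg_eq_countP (wa wb : Int) (l : List (List Int)) (lb : Int)
    (hp : l.Pairwise (fun p q => ltK q p = false)) :
    cg wa wb l lb = (l.countP (fun x =>
      decide (lb ≤ fb x) && decide (wa + wb < fa x + fb x) &&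
        !(l.any (fun y => domBy x y))) : Int) := by
  induction l generalizing lb with
  | nil => simp [cg]
  | cons x t ih =>
    rcases List.pairwise_cons.mp hp with ⟨hR, hpt⟩
    have hRfact : ∀ y ∈ t, ¬fa x < fa y ∧ (fa y < fa x ∨ fb x ≤ fb y) := by
      intro y hy
      have := (ltK_false_iff y x).mp (hR y hy)
      omega
    -- x is never dominated inside x :: t (nothing there has a bigger first coordinate)
    have hself : ((x :: t).any (fun y => domBy x y)) = false := by
      simp only [List.any_eq_false]
      intro y hy
      rcases List.mem_cons.mp hy with rfl | hy
      · simp [domBy]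
      · have hxy : ¬ fa x < fa y := (hRfact y hy).1
        simp [domBy, hxy]
    by_cases h1 : lb ≤ fb x
    · have hcong : List.countP (fun y => decide (fb x ≤ fb y) &&
          decide (wa + wb < fa y + fb y) && !(t.any fun z => domBy y z)) t
          = List.countP (fun y => decide (lb ≤ fb y) &&
          decide (wa + wb < fa y + fb y) && !((x :: t).any fun z => domBy y z)) t := by
        apply List.countP_congr
        intro y hy
        have hf := hRfact y hy
        cases hAt : t.any (fun z => domBy y z) with
        | true =>
          simp only [List.any_cons, hAt]
          simp
        | false =>
          simp only [List.any_cons, hAt]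
          simp only [Bool.or_false, domBy, Bool.and_eq_true, Bool.not_eq_true',
            Bool.and_eq_false_iff, decide_eq_true_eq, decide_eq_false_iff_not,
            Bool.not_false, Bool.and_true]
          omega
      simp only [cg, h1, if_true]
      rw [ih _ hpt, hcong, List.countP_cons, hself]
      have h1' : decide (lb ≤ fb x) = true := by simp [h1]
      rw [h1']
      by_cases hS : wa + wb < fa x + fb x <;> simp [hS] <;> push_cast <;> omega
    · have hcong : List.countP (fun y => decide (lb ≤ fb y) &&
          decide (wa + wb < fa y + fb y) && !(t.any fun z => domBy y z)) t
          = List.countP (fun y => decide (lb ≤ fb y) &&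
          decide (wa + wb < fa y + fb y) && !((x :: t).any fun z => domBy y z)) t := by
        apply List.countP_congr
        intro y hy
        cases hAt : t.any (fun z => domBy y z) with
        | true =>
          simp only [List.any_cons, hAt]
          simp
        | false =>
          simp only [List.any_cons, hAt]
          simp only [Bool.or_false, domBy, Bool.and_eq_true, Bool.not_eq_true',
            Bool.and_eq_false_iff, decide_eq_true_eq, decide_eq_false_iff_not,
            Bool.not_false, Bool.and_true]
          omega
      simp only [cg, h1, if_false]
      rw [ih _ hpt, hcong, List.countP_cons]
      have h1' : decide (lb ≤ fb x) = false := by simp [h1]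
      rw [h1']
      simp

-- closed form for A on a nonempty input
lemma solution_closed (w : List Int) (others : List (List Int)) :
    solution (w :: others) =
      if ∃ y ∈ others, fa w < fa y ∧ fb w < fb y then -1
      else 1 + (others.countP (fun x =>
        decide (0 ≤ fb x) && decide (fa w + fb w < fa x + fb x) &&
          !(others.any (fun y => domBy x y))) : Int) := by
  have hperm : (PySem.List.sorted2 others (fun x => -(fa x)) (fun x => fb x)).Perm others :=
    PySem.List.sorted2_perm ..
  set s := PySem.List.sorted2 others (fun x => -(fa x)) (fun x => fb x) with hs
  have hpair : s.Pairwise (fun p q => ltK q p = false) := by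
    rw [hs, sorted2_eq_foldl]
    exact foldl_insertBy_pairwise others [] List.Pairwise.nil
  by_cases hdom : ∃ y ∈ others, fa w < fa y ∧ fb w < fb y
  · rcases hdom with ⟨y, hy, hdy⟩
    rw [if_pos ⟨y, hy, hdy⟩]
    exact loopA_dominated _ _ _ _ _ ⟨y, (hperm.mem_iff).mpr hy, hdy⟩
  · rw [if_neg hdom]
    have hnd : ∀ x ∈ s, ¬(fa w < fa x ∧ fb w < fb x) := fun x hx hc =>
      hdom ⟨x, (hperm.mem_iff).mp hx, hc⟩
    show loopA (fa w) (fb w) s 1 0 = _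
    rw [loopA_eq_cg _ _ _ _ _ hnd, cg_eq_countP _ _ _ _ hpair]
    congr 1
    have hany : ∀ y, (s.any fun z => domBy y z) = (others.any fun z => domBy y z) := by
      intro y
      cases h : others.any fun z => domBy y z with
      | true =>
        simp only [List.any_eq_true] at h ⊢
        rcases h with ⟨z, hz, hdz⟩
        exact ⟨z, (hperm.mem_iff).mpr hz, hdz⟩
      | false =>
        simp only [List.any_eq_false] at h ⊢
        exact fun z hz => h z ((hperm.mem_iff).mp hz)
    rw [List.countP_congr (q := fun x =>
      decide (0 ≤ fb x) && decide (fa w + fb w < fa x + fb x) &&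
        !(others.any (fun y => domBy x y))) (fun y _ => by rw [hany y])]
    exact congrArg Nat.cast (hperm.countP_eq _)

-- closed form for B on a nonempty input
lemma solution_alt_closed (w : List Int) (others : List (List Int)) :
    solution_alt (w :: others) =
      if ∃ y ∈ others, fa w < fa y ∧ fb w < fb y then -1
      else 1 + (others.countP (fun x =>
        decide (fa w + fb w < fa x + fb x) &&
          !(others.any (fun y => domBy x y))) : Int) := by
  by_cases hdom : ∃ y ∈ others, fa w < fa y ∧ fb w < fb y
  · have h : others.any (fun y => domBy w y) = true := by
      simp only [List.any_eq_true, domBy, Bool.and_eq_true, decide_eq_true_eq]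
      rcases hdom with ⟨y, hy, h1, h2⟩
      exact ⟨y, hy, h1, h2⟩
    simp [solution_alt, h, hdom]
  · have h : others.any (fun y => domBy w y) = false := by
      simp only [List.any_eq_false, Bool.not_eq_true, domBy, Bool.and_eq_false_iff,
        decide_eq_false_iff_not]
      intro y hy
      by_cases h1 : fa w < fa y
      · exact Or.inr (fun h2 => hdom ⟨y, hy, h1, h2⟩)
      · exact Or.inl h1
    simp [solution_alt, h, hdom]

-- a strict countP comparison, used for tightness
lemma countP_lt_of_witness {α : Type} (p q : α → Bool) (l : List α)
    (hmono : ∀ y ∈ l, p y = true → q y = true)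
    {x : α} (hx : x ∈ l) (hqx : q x = true) (hpx : p x = false) :
    l.countP p < l.countP q := by
  induction l with
  | nil => simp at hx
  | cons a t ih =>
    have hmono' : ∀ y ∈ t, p y = true → q y = true :=
      fun y hy => hmono y (List.mem_cons_of_mem _ hy)
    have hle : t.countP p ≤ t.countP q := List.countP_mono_left hmono'
    rcases List.mem_cons.mp hx with rfl | hx
    · simp [List.countP_cons, hqx, hpx]
      omega
    · have := ih hmono' hx
      simp only [List.countP_cons]
      have : (if p a = true then 1 else 0) ≤ (if q a = true then 1 else 0) := by
        by_cases hpa : p a = true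
        · simp [hpa, hmono a (List.mem_cons_self ..) hpa]
        · simp [hpa]
      omega

-- the scores of a length-2 row sum to first + second
lemma sum_two {x : List Int} (h : x.length = 2) : x.sum = fa x + fb x := by
  match x, h with
  | [a, b], _ => simp [fa, fb]

-- D_solution on a nonempty well-formed input, in terms of the row accessors
lemma D_cons_iff (w : List Int) (others : List (List Int)) (hw : w.length = 2)
    (hall : ∀ x ∈ others, x.length = 2) :
    D_solution (w :: others) ↔
      ((∀ y ∈ others, ¬(fa w < fa y ∧ fb w < fb y)) ∧
       ∃ x ∈ others, fb x < 0 ∧ fa w + fb w < fa x + fb x ∧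
         ∀ y ∈ others, ¬(fa x < fa y ∧ fb x < fb y)) := by
  unfold D_solution
  simp only [List.headI, List.tail_cons]
  constructor
  · rintro ⟨h1, x, hx, hb, hs, h2⟩
    rw [sum_two hw, sum_two (hall x hx)] at hs
    refine ⟨fun y hy => ?_, x, hx, hb, hs, fun y hy => ?_⟩
    · simpa [worse, fa, fb] using h1 y (List.mem_cons_of_mem _ hy)
    · simpa [worse, fa, fb] using h2 y (List.mem_cons_of_mem _ hy)
  · rintro ⟨h1, x, hx, hb, hs, h2⟩
    have hs' : w.sum < x.sum := by rw [sum_two hw, sum_two (hall x hx)]; exact hs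
    refine ⟨fun y hy => ?_, x, hx, hb, hs', fun y hy => ?_⟩
    · rcases List.mem_cons.mp hy with rfl | hy
      · simp only [worse, fa, fb, decide_eq_true_eq]
        omega
      · simpa [worse, fa, fb] using h1 y hy
    · rcases List.mem_cons.mp hy with rfl | hy
      · have hs2 := hs
        simp only [fa, fb] at hs2
        simp only [worse, decide_eq_true_eq]
        omega
      · simpa [worse, fa, fb] using h2 y hy

-- pointwise equality of the two count predicates when no negative undominated
-- higher-total competitor exists
lemma pred_eq_of_not_D (w : List Int) (others : List (List Int))
    (hDx : ¬ ∃ x ∈ others, fb x < 0 ∧ fa w + fb w < fa x + fb x ∧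
      ∀ y ∈ others, ¬(fa x < fa y ∧ fb x < fb y)) :
    ∀ x ∈ others,
      (decide (0 ≤ fb x) && decide (fa w + fb w < fa x + fb x) &&
        !(others.any (fun y => domBy x y))) = true ↔
      (decide (fa w + fb w < fa x + fb x) &&
        !(others.any (fun y => domBy x y))) = true := by
  intro x hxm
  simp only [Bool.and_eq_true, Bool.not_eq_true', decide_eq_true_eq]
  constructor
  · rintro ⟨⟨_, hs⟩, ha⟩
    exact ⟨hs, ha⟩
  · rintro ⟨hs, ha⟩
    refine ⟨⟨?_, hs⟩, ha⟩
    by_cases hneg : 0 ≤ fb x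
    · exact hneg
    · exfalso
      apply hDx
      refine ⟨x, hxm, by omega, hs, ?_⟩
      intro y hy
      simp only [List.any_eq_false] at ha
      have := ha y hy
      simp only [domBy, Bool.and_eq_true, decide_eq_true_eq] at this
      exact this

-- ===== VERDICT (by name: the statement is the Claim_ definition above) =====
theorem solution_spec : Claim_unchanged_solution := by
  intro scores _hdom hpre hD
  match scores with
  | [] => exact absurd rfl hpre.1
  | w :: others =>
    have hw : w.length = 2 := hpre.2 w (List.mem_cons_self ..)
    have hall : ∀ x ∈ others, x.length = 2 := fun x hx => hpre.2 x (List.mem_cons_of_mem _ hx)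
    rw [solution_closed, solution_alt_closed]
    by_cases hdom : ∃ y ∈ others, fa w < fa y ∧ fb w < fb y
    · rw [if_pos hdom, if_pos hdom]
    · rw [if_neg hdom, if_neg hdom]
      have hnd : ∀ y ∈ others, ¬(fa w < fa y ∧ fb w < fb y) :=
        fun y hy hc => hdom ⟨y, hy, hc.1, hc.2⟩
      have hDx : ¬ ∃ x ∈ others, fb x < 0 ∧ fa w + fb w < fa x + fb x ∧
          ∀ y ∈ others, ¬(fa x < fa y ∧ fb x < fb y) :=
        fun hc => hD ((D_cons_iff w others hw hall).mpr ⟨hnd, hc⟩)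
      have := List.countP_congr (pred_eq_of_not_D w others hDx)
      omega

theorem solution_changed : Claim_changed_solution := by
  unfold Claim_changed_solution; decide

theorem solution_tight : Claim_exact_solution := by
  intro scores _hdom hpre hD
  match scores with
  | [] => exact absurd rfl hpre.1
  | w :: others =>
    have hw : w.length = 2 := hpre.2 w (List.mem_cons_self ..)
    have hall : ∀ x ∈ others, x.length = 2 := fun x hx => hpre.2 x (List.mem_cons_of_mem _ hx)
    rcases (D_cons_iff w others hw hall).mp hD with ⟨hnd, x, hxm, hxb, hxs, hxundom⟩
    have hnd' : ¬ ∃ y ∈ others, fa w < fa y ∧ fb w < fb y := by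
      rintro ⟨y, hy, h1, h2⟩
      exact hnd y hy ⟨h1, h2⟩
    rw [solution_closed, solution_alt_closed, if_neg hnd', if_neg hnd']
    have hanyx : (others.any fun y => domBy x y) = false := by
      simp only [List.any_eq_false, Bool.not_eq_true, domBy, Bool.and_eq_false_iff,
        decide_eq_false_iff_not]
      intro y hy
      have := hxundom y hy
      omega
    have hlt : others.countP (fun x =>
        decide (0 ≤ fb x) && decide (fa w + fb w < fa x + fb x) &&
          !(others.any (fun y => domBy x y))) <
        others.countP (fun x =>
        decide (fa w + fb w < fa x + fb x) && !(others.any (fun y => domBy x y))) := by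
      apply countP_lt_of_witness _ _ _ ?_ hxm
      · simp [hanyx, hxs]
      · simp [hanyx, hxb]
      · intro y _
        simp only [Bool.and_eq_true, and_imp]
        tauto
    intro hc
    omega
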